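-- pv_equiv track=rewrite | github.com/jwillis0720/sadie | src/sadie/anarci/aa/hmmer.py | get_vector_state
-- ===== SOURCE A (Python) =====
-- from typing import Union, List, Tuple
--
-- def get_vector_state(
--
--     hmm_seq: str,
--     query_seq: str,
--     hmm_start: int,
--     hmm_end: int,
--     query_start: int,
--     query_end: int,
--     **kwargs,
-- ) -> List[Tuple[Tuple[int, str], int]]:
--     # assert target_start < 5, "Query start should not be more than 5"
--     assert len(hmm_seq) == len(query_seq), "The 2 seqs should be alignments of eachother"
--
--     vector_state = []
--
--     hmm_step = hmm_start
--     query_step = query_start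
--
--     for i in range(len(hmm_seq)):
--         if hmm_seq[i] == ".":
--             vector_state.append(((hmm_step, "i"), query_step))
--             query_step += 1
--         elif query_seq[i] == "-":
--             vector_state.append(((hmm_step, "d"), None))
--             hmm_step += 1
--         else:
--             vector_state.append(((hmm_step, "m"), query_step))
--             hmm_step += 1
--             query_step += 1
--
--     return vector_state
-- ===== SOURCE B (Python) =====
-- from itertools import accumulate
-- from typing import List, Tuple
--
-- def get_vector_state(
--     hmm_seq: str,
--     query_seq: str,
--     hmm_start: int,
--     hmm_end: int,
--     query_start: int,
--     query_end: int,
--     **kwargs,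
-- ) -> List[Tuple[Tuple[int, str], int]]:
--     assert len(hmm_seq) == len(query_seq), "The 2 seqs should be alignments of eachother"
--     # classify each column first ('.' wins over '-'), then prefix-sum the step counters
--     cats = ["i" if h == "." else ("d" if q == "-" else "m") for h, q in zip(hmm_seq, query_seq)]
--     hmm_steps = accumulate((0 if c == "i" else 1 for c in cats), initial=hmm_start)
--     query_steps = accumulate((0 if c == "d" else 1 for c in cats), initial=query_start)
--     return [((h, c), None if c == "d" else q) for c, h, q in zip(cats, hmm_steps, query_steps)]
-- ===== Notes on version B (the rewrite author's own statement) =====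
-- stated objective: alternative
-- what changed: Replaces the single stateful loop with mutable counters by a three-stage pipeline: classify each aligned column into i/d/m, compute both step counters as prefix sums with itertools.accumulate, and zip the categories with the two counter streams.
import Mathlib
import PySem

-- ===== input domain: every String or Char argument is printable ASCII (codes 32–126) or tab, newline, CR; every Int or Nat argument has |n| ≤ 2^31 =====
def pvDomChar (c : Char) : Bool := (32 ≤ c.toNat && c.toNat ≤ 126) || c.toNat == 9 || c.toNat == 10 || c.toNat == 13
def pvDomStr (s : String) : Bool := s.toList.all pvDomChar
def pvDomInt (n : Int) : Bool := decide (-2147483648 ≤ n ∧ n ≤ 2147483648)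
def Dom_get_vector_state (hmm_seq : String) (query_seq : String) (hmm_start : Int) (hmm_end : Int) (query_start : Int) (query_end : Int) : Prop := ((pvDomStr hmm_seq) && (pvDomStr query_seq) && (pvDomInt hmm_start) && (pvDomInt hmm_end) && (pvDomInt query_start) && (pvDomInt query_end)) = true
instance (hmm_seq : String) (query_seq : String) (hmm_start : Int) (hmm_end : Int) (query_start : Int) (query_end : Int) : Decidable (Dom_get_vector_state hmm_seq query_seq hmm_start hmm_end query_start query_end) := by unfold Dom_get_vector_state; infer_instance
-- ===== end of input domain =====

-- B replaces A's one stateful loop (two mutable counters) by a classify / prefix-sum / zip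
-- pipeline; same O(n) cost, different decomposition. Both raise on unequal-length inputs
-- (excluded by Pre_).

-- ===== PORT A =====
-- A's for-loop over the aligned columns, carrying (hmm_step, query_step); under Pre_ the two
-- strings have equal length, so the paired structural recursion visits exactly A's indices.
def gvsA_loop : List Char → List Char → Int → Int → List ((Int × String) × Option Int)
  | hc :: ht, qc :: qt, hstep, qstep =>
      if hc = '.' then ((hstep, "i"), some qstep) :: gvsA_loop ht qt hstep (qstep + 1)
      else if qc = '-' then ((hstep, "d"), none) :: gvsA_loop ht qt (hstep + 1) qstep
      else ((hstep, "m"), some qstep) :: gvsA_loop ht qt (hstep + 1) (qstep + 1)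
  | _, _, _, _ => []

def get_vector_state (hmm_seq : String) (query_seq : String) (hmm_start : Int) (hmm_end : Int) (query_start : Int) (query_end : Int) : List ((Int × String) × Option Int) :=
  gvsA_loop hmm_seq.toList query_seq.toList hmm_start query_start

-- ===== PORT B =====
-- category of each column: "i" if hmm char is '.', else "d" if query char is '-', else "m"
def gvsB_cats (h q : List Char) : List String :=
  (List.zip h q).map (fun p => if p.1 = '.' then "i" else if p.2 = '-' then "d" else "m")

def get_vector_state_alt (hmm_seq : String) (query_seq : String) (hmm_start : Int) (hmm_end : Int) (query_start : Int) (query_end : Int) : List ((Int × String) × Option Int) :=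
  let cats := gvsB_cats hmm_seq.toList query_seq.toList
  -- itertools.accumulate(..., initial=start) = List.scanl (+) start
  let hmm_steps := cats.scanl (fun a c => a + (if c = "i" then 0 else 1)) hmm_start
  let query_steps := cats.scanl (fun a c => a + (if c = "d" then 0 else 1)) query_start
  (List.zip cats (List.zip hmm_steps query_steps)).map
    (fun p => ((p.2.1, p.1), if p.1 = "d" then none else some p.2.2))

-- ===== PRECONDITION & SPEC =====
-- Pre_ excludes unequal-length inputs, on which A's assertion raises AssertionError.
def Pre_get_vector_state (hmm_seq : String) (query_seq : String) (hmm_start : Int) (hmm_end : Int) (query_start : Int) (query_end : Int) : Prop :=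
  hmm_seq.toList.length = query_seq.toList.length
instance (hmm_seq : String) (query_seq : String) (hmm_start : Int) (hmm_end : Int) (query_start : Int) (query_end : Int) : Decidable (Pre_get_vector_state hmm_seq query_seq hmm_start hmm_end query_start query_end) := by unfold Pre_get_vector_state; infer_instance

def pvWitness_get_vector_state : String × String × Int × Int × Int × Int := ("m.-x", "a-b-", 3, 7, 1, 9)

def Spec_get_vector_state (hmm_seq : String) (query_seq : String) (hmm_start : Int) (hmm_end : Int) (query_start : Int) (query_end : Int) (out : List ((Int × String) × Option Int)) : Prop := out = get_vector_state_alt hmm_seq query_seq hmm_start hmm_end query_start query_end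
instance (hmm_seq : String) (query_seq : String) (hmm_start : Int) (hmm_end : Int) (query_start : Int) (query_end : Int) (out : List ((Int × String) × Option Int)) : Decidable (Spec_get_vector_state hmm_seq query_seq hmm_start hmm_end query_start query_end out) := by unfold Spec_get_vector_state; infer_instance

-- ===== CLAIM (what is proved, stated in full; the proofs are below) =====
def Claim_equal_get_vector_state : Prop := ∀ (hmm_seq : String) (query_seq : String) (hmm_start : Int) (hmm_end : Int) (query_start : Int) (query_end : Int), Dom_get_vector_state hmm_seq query_seq hmm_start hmm_end query_start query_end → Pre_get_vector_state hmm_seq query_seq hmm_start hmm_end query_start query_end → Spec_get_vector_state hmm_seq query_seq hmm_start hmm_end query_start query_end (get_vector_state hmm_seq query_seq hmm_start hmm_end query_start query_end)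

-- ===== LEMMAS AND PROOFS =====

lemma gvs_main (h q : List Char) (a b : Int) (hlen : h.length = q.length) :
    gvsA_loop h q a b =
      (List.zip (gvsB_cats h q)
        (List.zip ((gvsB_cats h q).scanl (fun s c => s + (if c = "i" then 0 else 1)) a)
                  ((gvsB_cats h q).scanl (fun s c => s + (if c = "d" then 0 else 1)) b))).map
        (fun p => ((p.2.1, p.1), if p.1 = "d" then none else some p.2.2)) := by
  induction h generalizing q a b with
  | nil =>
      cases q with
      | nil => simp [gvsA_loop, gvsB_cats]
      | cons qc qt => simp at hlen
  | cons hc ht ih =>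
      cases q with
      | nil => simp at hlen
      | cons qc qt =>
          simp only [List.length_cons, Nat.add_right_cancel_iff] at hlen
          by_cases h1 : hc = '.'
          · simp [gvsA_loop, gvsB_cats, h1, List.scanl, ih qt a (b + 1) hlen]
          · by_cases h2 : qc = '-'
            · simp [gvsA_loop, gvsB_cats, h1, h2, List.scanl, ih qt (a + 1) b hlen]
            · simp [gvsA_loop, gvsB_cats, h1, h2, List.scanl, ih qt (a + 1) (b + 1) hlen]

-- ===== VERDICT (by name: the statement is the Claim_ definition above) =====
theorem get_vector_state_spec : Claim_equal_get_vector_state := by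
  intro hmm_seq query_seq hmm_start hmm_end query_start query_end _ hpre
  unfold Spec_get_vector_state get_vector_state get_vector_state_alt
  exact gvs_main _ _ _ _ hpre
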